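-- pv_equiv track=rewrite | github.com/kim-do-hyeon/Algorithm | 백준/Silver/12871. 무한 문자열/무한 문자열.py | find_basis
-- ===== SOURCE A (Python) =====
-- def find_basis(s) :
--     for i in range(1, len(s) + 1) :
--         if len(s) % i != 0 :
--             continue
--
--         bad = False
--         for j in range(i, len(s), i) :
--             if s[j:j + i] != s[:i] :
--                 bad = True
--                 break
--
--         if not bad :
--             return s[:i]
-- ===== SOURCE B (Python) =====
-- def find_basis(s):
--     # basis length = smallest k >= 1 with s equal to its rotation by k,
--     # i.e. the first occurrence of s in s+s at index >= 1 (always <= len(s)).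
--     if not s:
--         return None
--     return s[:(s + s).find(s, 1)]
-- ===== Notes on version B (the rewrite author's own statement) =====
-- stated objective: faster
-- what changed: Replaces A's loop over all candidate lengths with per-candidate block comparisons by the rotation/doubling trick: the basis length is the first occurrence of s in s+s at index >= 1, found by one C-level substring search; correct because rotations fixing s form a subgroup of Z_n, so the least fixing shift divides n and equals the least divisor-length period.
import Mathlib
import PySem

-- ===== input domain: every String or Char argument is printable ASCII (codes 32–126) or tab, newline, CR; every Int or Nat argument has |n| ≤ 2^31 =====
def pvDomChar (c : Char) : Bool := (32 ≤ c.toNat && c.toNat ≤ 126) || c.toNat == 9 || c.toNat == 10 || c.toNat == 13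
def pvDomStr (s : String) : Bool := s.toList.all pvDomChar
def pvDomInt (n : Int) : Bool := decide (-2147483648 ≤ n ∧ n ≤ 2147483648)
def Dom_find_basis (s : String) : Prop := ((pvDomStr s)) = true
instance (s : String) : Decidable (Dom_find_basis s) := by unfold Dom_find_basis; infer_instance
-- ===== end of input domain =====

-- B replaces A's divisor-by-divisor block verification by the rotation/doubling trick:
-- the basis length is the first index >= 1 at which s occurs in s+s (objective: faster, one substring search).

-- ===== PORT A =====
def find_basis (s : String) : Option String :=
  (PySem.List.pyRange 1 ((s.toList.length : Int) + 1) 1).foldl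
    (fun acc i =>
      match acc with
      | some r => some r
      | none =>
        if PySem.Int.mod (s.toList.length : Int) i ≠ 0 then none
        else
          if ((PySem.List.pyRange i (s.toList.length : Int) i).foldl
                (fun b j => b || decide (PySem.List.slice s.toList (some j) (some (j + i)) ≠ PySem.List.slice s.toList none (some i)))
                false) = false then
            some (String.ofList (PySem.List.slice s.toList none (some i)))
          else none)
    none

-- ===== PORT B =====
-- Source B: 'if not s: return None' then 'return s[:(s + s).find(s, 1)]'
def find_basis_alt (s : String) : Option String :=
  if s.toList.length = 0 then none
  else some (String.ofList (PySem.List.slice s.toList none (some (PySem.Str.findFrom (s ++ s) s 1 none))))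

-- ===== PRECONDITION & SPEC =====
def Spec_find_basis (s : String) (out : Option String) : Prop := out = find_basis_alt s
instance (s : String) (out : Option String) : Decidable (Spec_find_basis s out) := by unfold Spec_find_basis; infer_instance

-- ===== CLAIM (what is proved, stated in full; the proofs are below) =====
def Claim_equal_find_basis : Prop := ∀ (s : String), Dom_find_basis s → Spec_find_basis s (find_basis s)

-- ===== LEMMAS AND PROOFS =====

-- A's 'return inside the loop' fold is a findSome?.
theorem pvFoldlFirstSome (L : List Int) (g : Int → Option String) (acc : Option String) :
    L.foldl (fun a i => match a with | some r => some r | none => g i) acc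
      = match acc with | some r => some r | none => L.findSome? g := by
  induction L generalizing acc with
  | nil => cases acc <;> rfl
  | cons x t ih =>
    cases acc with
    | some r => simpa using ih (some r)
    | none =>
      have := ih (g x)
      cases hg : g x with
      | some r => simp [hg] at this; simpa [List.findSome?_cons, hg] using this
      | none => simp [hg] at this; simpa [List.findSome?_cons, hg] using this

theorem pvFindSomeCongr (L : List Int) (f g : Int → Option String)
    (h : ∀ x ∈ L, f x = g x) : L.findSome? f = L.findSome? g := by
  induction L with
  | nil => rfl
  | cons x t ih =>
    rw [List.findSome?_cons, List.findSome?_cons, h x (by simp),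
      ih (fun y hy => h y (by simp [hy]))]

-- the boolean 'bad' fold is an any
theorem pvFoldlOr {α : Type} (p : α → Bool) (L : List α) (b : Bool) :
    L.foldl (fun b x => b || p x) b = (b || L.any p) := by
  induction L generalizing b with
  | nil => simp
  | cons x t ih => simp [List.any_cons, ih, Bool.or_assoc]

-- dropping m blocks of a q-fold repetition
theorem pvDropFlatten {α : Type} (p : List α) (m : ℕ) :
    ∀ q, m ≤ q → (List.replicate q p).flatten.drop (m * p.length) = (List.replicate (q - m) p).flatten := by
  induction m with
  | zero => intro q _; simp
  | succ m ih =>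
    intro q hq
    cases q with
    | zero => omega
    | succ q' =>
      have h1 : (m + 1) * p.length = p.length + m * p.length := by ring
      rw [List.replicate_succ, List.flatten_cons, h1, List.drop_length_add_append,
        ih q' (by omega)]
      have h2 : q' - m = q' + 1 - (m + 1) := by omega
      rw [h2]

-- all blocks equal the prefix ↔ the string is the prefix repeated
theorem pvRepIff (i : ℕ) (_hi : 0 < i) :
    ∀ (q : ℕ) (l : List Char), l.length = q * i →
      ((∀ m, 0 < m → m < q → (l.drop (m * i)).take i = l.take i) ↔
        (List.replicate q (l.take i)).flatten = l) := by
  intro q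
  induction q with
  | zero =>
    intro l hl
    have : l = [] := List.eq_nil_of_length_eq_zero (by omega)
    simp [this]
  | succ q' ih =>
    intro l hl
    constructor
    · intro H
      by_cases hq0 : q' = 0
      · subst hq0
        have : l.take i = l := List.take_of_length_le (by omega)
        simp [this]
      have hrest : (l.drop i).length = q' * i := by
        simp [hl]; ring_nf; omega
      have hti : (l.drop i).take i = l.take i := by
        have := H 1 (by omega) (by omega)
        simpa using this
      have Hrest : ∀ m, 0 < m → m < q' → ((l.drop i).drop (m * i)).take i = (l.drop i).take i := by
        intro m hm hmq
        rw [List.drop_drop, hti]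
        have harith : i + m * i = (m + 1) * i := by ring
        rw [harith]
        exact H (m + 1) (by omega) (by omega)
      have := (ih (l.drop i) hrest).mp Hrest
      rw [hti] at this
      calc (List.replicate (q' + 1) (l.take i)).flatten
          = l.take i ++ (List.replicate q' (l.take i)).flatten := by
            rw [List.replicate_succ, List.flatten_cons]
        _ = l.take i ++ l.drop i := by rw [this]
        _ = l := List.take_append_drop i l
    · intro H m hm hmq
      have hile : i ≤ l.length := by
        rw [hl]; exact Nat.le_mul_of_pos_left i (by omega)
      have hplen : (l.take i).length = i := by
        rw [List.length_take]; omega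
      have hdrop := pvDropFlatten (l.take i) m (q' + 1) (by omega)
      rw [hplen, H] at hdrop
      rw [hdrop]
      have : q' + 1 - m = (q' - m) + 1 := by omega
      rw [this, List.replicate_succ, List.flatten_cons, List.take_append_of_le_length (by omega)]
      simp [hplen]

-- being a prefix of (l++l).drop k is being fixed by rotation by k (k ≤ n)
theorem pvPrefixDropIffRotate (l : List Char) (k : ℕ) (hk : k ≤ l.length) :
    (l <+: (l ++ l).drop k) ↔ l.rotate k = l := by
  rw [List.drop_append_of_le_length hk, List.rotate_eq_drop_append_take hk,
    List.prefix_iff_eq_take, List.take_append]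
  have h1 : (l.drop k).take l.length = l.drop k := List.take_of_length_le (by simp)
  have h2 : l.length - (l.drop k).length = k := by simp; omega
  rw [h1, h2]
  exact eq_comm

-- rotation by a multiple of a fixing shift fixes
theorem pvRotateMul (l : List Char) (d : ℕ) (h : l.rotate d = l) :
    ∀ m, l.rotate (m * d) = l := by
  intro m
  induction m with
  | zero => simp
  | succ m ih =>
    have : (m + 1) * d = m * d + d := by ring
    rw [this, ← List.rotate_rotate, ih, h]

-- for i ∣ n, i-rotation-invariance is exactly the replicate decomposition
theorem pvRotIffRep (l : List Char) (i q : ℕ) (hi : 0 < i) (hq : 0 < q)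
    (hlen : l.length = q * i) :
    l.rotate i = l ↔ (List.replicate q (l.take i)).flatten = l := by
  have hile : i ≤ l.length := by rw [hlen]; exact Nat.le_mul_of_pos_left i hq
  constructor
  · intro hrot
    refine (pvRepIff i hi q l hlen).mp ?_
    intro m hm hmq
    have hfix := pvRotateMul l i hrot m
    have hmi : m * i ≤ l.length := by rw [hlen]; exact Nat.mul_le_mul_right i (by omega)
    have hrw := List.rotate_eq_drop_append_take hmi ▸ hfix
    have : (l.drop (m * i) ++ l.take (m * i)).take i = l.take i := by rw [hrw]
    have hle : i ≤ (l.drop (m * i)).length := by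
      simp only [List.length_drop]
      have h3 : (m + 1) * i ≤ q * i := Nat.mul_le_mul_right i (by omega)
      have h4 : (m + 1) * i = m * i + i := by ring
      omega
    rwa [List.take_append_of_le_length hle] at this
  · intro hflat
    rw [List.rotate_eq_drop_append_take hile]
    have hplen : (l.take i).length = i := by rw [List.length_take]; omega
    have hdrop : l.drop i = (List.replicate (q - 1) (l.take i)).flatten := by
      have := pvDropFlatten (l.take i) 1 q hq
      rw [hplen, one_mul, hflat] at this
      exact this
    have htake : (List.replicate 1 (l.take i)).flatten = l.take i := by simp
    calc l.drop i ++ l.take i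
        = (List.replicate (q - 1) (l.take i)).flatten ++ (List.replicate 1 (l.take i)).flatten := by
          rw [hdrop, htake]
      _ = (List.replicate (q - 1 + 1) (l.take i)).flatten := by
          rw [← List.flatten_append, ← List.replicate_add]
      _ = l := by rw [Nat.sub_add_cancel hq, hflat]

-- A's per-candidate body, rewritten through blocks/replicate to rotation invariance
theorem pvBody (l : List Char) (x : Int) (hx1 : 1 ≤ x) (hxn : x ≤ (l.length : Int)) :
    (if PySem.Int.mod (l.length : Int) x ≠ 0 then none
     else
       if ((PySem.List.pyRange x (l.length : Int) x).foldl
             (fun b j => b || decide (PySem.List.slice l (some j) (some (j + x)) ≠ PySem.List.slice l none (some x)))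
             false) = false then
         some (String.ofList (PySem.List.slice l none (some x)))
       else none)
    = (if (PySem.Int.mod (l.length : Int) x = 0 ∧ l.rotate x.toNat = l) then
        some (String.ofList (l.take x.toNat)) else none) := by
  by_cases hmod : PySem.Int.mod (l.length : Int) x = 0
  · lift x to ℕ using (by omega) with iN
    have hiN1 : 1 ≤ iN := by exact_mod_cast hx1
    have hdvd : iN ∣ l.length := by
      exact_mod_cast (PySem.Int.mod_eq_zero_iff_dvd _ _).mp hmod
    obtain ⟨q, hq⟩ := hdvd
    have hlen : l.length = q * iN := by rw [hq]; ring
    have hq0 : 0 < q := by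
      have : iN ≤ l.length := by exact_mod_cast hxn
      nlinarith
    simp only [hmod, ne_eq, not_true_eq_false, if_false, Int.toNat_natCast, true_and]
    rw [PySem.List.slice_to_natCast, pvFoldlOr, Bool.false_or]
    apply if_congr _ rfl rfl
    rw [List.any_eq_false]
    have hbridge : (∀ j ∈ PySem.List.pyRange (iN : Int) ((l.length : Nat) : Int) (iN : Int),
        ¬(decide ¬(PySem.List.slice l (some j) (some (j + (iN : Int))) = List.take iN l)) = true)
        ↔ (∀ m : ℕ, 0 < m → m < q → (l.drop (m * iN)).take iN = l.take iN) := by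
      constructor
      · intro H m hm hmq
        have hmem : ((m * iN : ℕ) : Int) ∈ PySem.List.pyRange (iN : Int) ((l.length : Nat) : Int) (iN : Int) := by
          rw [PySem.List.mem_pyRange_iff_of_pos (by exact_mod_cast hiN1)]
          refine ⟨by push_cast; nlinarith, by rw [hlen]; push_cast; nlinarith,
            ⟨((m - 1 : ℕ) : Int), by push_cast [Nat.cast_sub (by omega : 1 ≤ m)]; ring⟩⟩
        have hj := H _ hmem
        simp only [decide_eq_true_eq, not_not] at hj
        rwa [PySem.List.slice_natCast_add] at hj
      · intro H j hj
        rw [PySem.List.mem_pyRange_iff_of_pos (by exact_mod_cast hiN1)] at hj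
        obtain ⟨hj1, hj2, t, ht⟩ := hj
        have htn : 0 ≤ t := by nlinarith [hj1, ht]
        lift t to ℕ using htn with tN
        have hjval : j = (((tN + 1) * iN : ℕ) : Int) := by push_cast; linarith [ht]
        have hmq : tN + 1 < q := by
          rw [hlen] at hj2
          by_contra hc
          push Not at hc
          have : (q : Int) * (iN : Int) ≤ j := by rw [hjval]; push_cast; nlinarith
          push_cast at hj2
          nlinarith
        have hblk := H (tN + 1) (by omega) hmq
        simp only [decide_eq_true_eq, not_not]
        rw [hjval, PySem.List.slice_natCast_add, hblk]
    exact hbridge.trans ((pvRepIff iN (by omega) q l hlen).trans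
      (pvRotIffRep l iN q (by omega) hq0 hlen).symm)
  · have hb : ¬(PySem.Int.mod (l.length : Int) x = 0 ∧ l.rotate x.toNat = l) := fun h => hmod h.1
    simp [hmod]

theorem pvMain (s : String) : find_basis s = find_basis_alt s := by
  unfold find_basis find_basis_alt
  set l := s.toList with hl
  by_cases hn0 : l.length = 0
  · simp [hn0]
  have hn : 0 < l.length := Nat.pos_of_ne_zero hn0
  set n := l.length with hnn
  -- B's self-overlap search: characterise the first match index
  have hlen2 : 1 ≤ (l ++ l).length := by simp; omega
  have hFne : PySem.Chars.findFrom (l ++ l) l ((1 : ℕ) : Int) none ≠ -1 := by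
    intro hEq
    rw [PySem.Chars.findFrom_natCast_eq_neg_one_iff (l ++ l) l 1 hlen2] at hEq
    exact hEq (List.infix_iff_prefix_suffix.mpr ⟨l, List.prefix_refl l,
      by rw [List.drop_append_of_le_length (by omega)]; exact List.suffix_append _ _⟩)
  obtain ⟨hF1, hFpre, hFmin⟩ := PySem.Chars.findFrom_natCast_spec (l ++ l) l 1 hlen2 hFne
  set F := PySem.Chars.findFrom (l ++ l) l ((1 : ℕ) : Int) none with hFdef
  set d := F.toNat with hd
  have hF0 : (0 : Int) ≤ F := le_trans (by norm_num) hF1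
  have hFd : F = (d : Int) := (Int.toNat_of_nonneg hF0).symm
  have hd1 : 1 ≤ d := by omega
  have hmatchn : l <+: (l ++ l).drop n := by
    rw [pvPrefixDropIffRotate l n le_rfl]; exact List.rotate_length l
  have hdn : d ≤ n := by
    by_contra hc
    exact (hFmin n (by omega) (by omega)) hmatchn
  have hrotd : l.rotate d = l := (pvPrefixDropIffRotate l d hdn).mp hFpre
  have hminrot : ∀ k : ℕ, 1 ≤ k → k < d → l.rotate k ≠ l := by
    intro k hk1 hkd hfix
    exact hFmin k hk1 hkd ((pvPrefixDropIffRotate l k (by omega)).mpr hfix)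
  -- fixing shifts form a subgroup of Z_n: the least one divides n
  have hddvd : d ∣ n := by
    have h1 : l.rotate (d * (n / d) + n % d) = l.rotate (n % d) := by
      rw [← List.rotate_rotate, mul_comm, pvRotateMul l d hrotd (n / d)]
    rw [Nat.div_add_mod] at h1
    have hr : l.rotate (n % d) = l := by rw [← h1]; exact List.rotate_length l
    rcases Nat.eq_zero_or_pos (n % d) with h0 | hpos
    · exact Nat.dvd_of_mod_eq_zero h0
    · exact absurd hr (hminrot _ (by omega) (Nat.mod_lt n (by omega)))
  -- rewrite A: fold → findSome?, candidate bodies → rotation tests, then split the range at d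
  rw [pvFoldlFirstSome]
  rw [pvFindSomeCongr _ _
    (fun x => if (PySem.Int.mod (n : Int) x = 0 ∧ l.rotate x.toNat = l) then
        some (String.ofList (l.take x.toNat)) else none)
    (by
      intro x hx
      rw [PySem.List.mem_pyRange_one] at hx
      exact pvBody l x hx.1 (by omega))]
  rw [PySem.List.pyRange_one_append 1 (d : Int) ((n : Int) + 1)
    (by exact_mod_cast hd1) (by exact_mod_cast Nat.le_succ_of_le hdn),
    List.findSome?_append]
  have hfirst : (PySem.List.pyRange 1 (d : Int) 1).findSome?
      (fun x => if (PySem.Int.mod (n : Int) x = 0 ∧ l.rotate x.toNat = l) then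
        some (String.ofList (l.take x.toNat)) else none) = none := by
    rw [List.findSome?_eq_none_iff]
    intro x hx
    rw [PySem.List.mem_pyRange_one] at hx
    have hxk : 1 ≤ x.toNat ∧ x.toNat < d := by omega
    rw [if_neg]
    rintro ⟨-, hrot⟩
    exact hminrot x.toNat hxk.1 hxk.2 hrot
  rw [hfirst]
  rw [PySem.List.pyRange_one_cons (by exact_mod_cast Nat.lt_succ_of_le hdn : (d : Int) < (n : Int) + 1),
    List.findSome?_cons]
  have hsecond : (if (PySem.Int.mod (n : Int) (d : Int) = 0 ∧ l.rotate (d : Int).toNat = l) then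
      some (String.ofList (l.take (d : Int).toNat)) else none)
      = some (String.ofList (l.take d)) := by
    rw [if_pos]
    · rw [Int.toNat_natCast]
    · refine ⟨(PySem.Int.mod_eq_zero_iff_dvd _ _).mpr (by exact_mod_cast hddvd), ?_⟩
      rw [Int.toNat_natCast]; exact hrotd
  rw [hsecond]
  -- B's value is the same take
  have hff : PySem.Str.findFrom (s ++ s) s 1 none = F := by
    rw [hFdef]
    simp [← hl]
  rw [if_neg hn0, hff, hFd, PySem.List.slice_to_natCast]
  rfl

-- ===== VERDICT (by name: the statement is the Claim_ definition above) =====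
theorem find_basis_spec : Claim_equal_find_basis := by
  intro s _
  unfold Spec_find_basis
  exact pvMain s
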